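-- pv_equiv track=rewrite | github.com/Shastri-Lab/tfln-ising-simulation | folding-lattice-proteins/dwave_to_isingmachine.py | get_idx_vector
-- ===== SOURCE A (Python) =====
-- def get_idx_vector(L, N, M):
--     num_sites = N*M
--     idx_vector = []
--     for f in range(L):
--         for s in range(0, num_sites):
--             x_idx = s % M
--             y_idx = s // M
--             lattice_parity = (x_idx%2 + y_idx%2) % 2
--             if lattice_parity != f%2: # skip if the lattice site is not of the same parity as the spin
--                 continue
--             idx_vector.append(((x_idx, y_idx), f))
--     return idx_vector
-- ===== SOURCE B (Python) =====
-- def get_idx_vector(L, N, M):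
--     # one pass over the lattice sites, bucketed by parity; then a pass over spins
--     if L <= 0:
--         return []
--     even, odd = [], []
--     for s in range(N * M):
--         x, y = s % M, s // M
--         if (x % 2 + y % 2) % 2 == 0:
--             even.append((x, y))
--         else:
--             odd.append((x, y))
--     buckets = (even, odd)
--     idx_vector = []
--     for f in range(L):
--         for xy in buckets[f % 2]:
--             idx_vector.append((xy, f))
--     return idx_vector
-- ===== Notes on version B (the rewrite author's own statement) =====
-- stated objective: simpler
-- what changed: B scans the N*M lattice sites once, bucketing coordinates into even/odd parity lists, then per spin f appends the matching bucket, instead of rescanning and filtering all sites for every f.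
import Mathlib
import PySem

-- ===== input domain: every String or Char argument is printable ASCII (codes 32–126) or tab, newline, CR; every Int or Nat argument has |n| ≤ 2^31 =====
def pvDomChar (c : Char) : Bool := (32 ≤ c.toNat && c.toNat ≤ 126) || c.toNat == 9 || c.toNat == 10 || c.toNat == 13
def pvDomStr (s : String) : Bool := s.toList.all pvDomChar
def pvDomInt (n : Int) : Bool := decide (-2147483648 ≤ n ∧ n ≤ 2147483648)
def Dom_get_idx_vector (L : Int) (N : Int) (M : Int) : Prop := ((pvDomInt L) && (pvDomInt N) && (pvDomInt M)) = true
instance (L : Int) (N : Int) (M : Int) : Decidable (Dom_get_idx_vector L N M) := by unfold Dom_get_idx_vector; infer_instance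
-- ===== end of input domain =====

-- B builds the even/odd parity buckets in one pass over the sites, then appends the matching bucket per spin (simpler decomposition, same values).
-- ===== PORT A =====
def get_idx_vector (L : Int) (N : Int) (M : Int) : List ((Int × Int) × Int) :=
  let num_sites := N * M
  (PySem.List.pyRange 0 L 1).foldl (fun idx_vector f =>
    (PySem.List.pyRange 0 num_sites 1).foldl (fun idx_vector s =>
      let x_idx := PySem.Int.mod s M
      let y_idx := PySem.Int.floordiv s M
      let lattice_parity := PySem.Int.mod (PySem.Int.mod x_idx 2 + PySem.Int.mod y_idx 2) 2
      if lattice_parity ≠ PySem.Int.mod f 2 then idx_vector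
      else idx_vector ++ [((x_idx, y_idx), f)]) idx_vector) []

-- ===== PORT B =====
def get_idx_vector_alt (L : Int) (N : Int) (M : Int) : List ((Int × Int) × Int) :=
  if L ≤ 0 then [] else
  let buckets := (PySem.List.pyRange 0 (N * M) 1).foldl
    (fun (eo : List (Int × Int) × List (Int × Int)) s =>
      let x := PySem.Int.mod s M
      let y := PySem.Int.floordiv s M
      if PySem.Int.mod (PySem.Int.mod x 2 + PySem.Int.mod y 2) 2 = 0 then
        (eo.1 ++ [(x, y)], eo.2)
      else
        (eo.1, eo.2 ++ [(x, y)])) ([], [])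
  (PySem.List.pyRange 0 L 1).foldl (fun idx_vector f =>
    (if PySem.Int.mod f 2 = 0 then buckets.1 else buckets.2).foldl
      (fun idx_vector xy => idx_vector ++ [(xy, f)]) idx_vector) []

-- ===== PRECONDITION & SPEC =====
def Spec_get_idx_vector (L : Int) (N : Int) (M : Int) (out : List ((Int × Int) × Int)) : Prop := out = get_idx_vector_alt L N M
instance (L : Int) (N : Int) (M : Int) (out : List ((Int × Int) × Int)) : Decidable (Spec_get_idx_vector L N M out) := by unfold Spec_get_idx_vector; infer_instance

-- ===== CLAIM (what is proved, stated in full; the proofs are below) =====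
def Claim_equal_get_idx_vector : Prop := ∀ (L : Int) (N : Int) (M : Int), Dom_get_idx_vector L N M → Spec_get_idx_vector L N M (get_idx_vector L N M)

-- ===== LEMMAS AND PROOFS =====

-- ===== VERDICT (by name: the statement is the Claim_ definition above) =====
def pvSite (M s : Int) : Int × Int := (PySem.Int.mod s M, PySem.Int.floordiv s M)

def pvPar (M s : Int) : Int :=
  PySem.Int.mod (PySem.Int.mod (PySem.Int.mod s M) 2 + PySem.Int.mod (PySem.Int.floordiv s M) 2) 2

theorem pvPar_cases (M s : Int) : pvPar M s = 0 ∨ pvPar M s = 1 := by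
  unfold pvPar
  rw [PySem.Int.mod_eq_emod_of_pos (by norm_num : (0:Int) < 2)]
  omega

theorem pvMod2_cases (f : Int) : PySem.Int.mod f 2 = 0 ∨ PySem.Int.mod f 2 = 1 := by
  rw [PySem.Int.mod_eq_emod_of_pos (by norm_num : (0:Int) < 2)]
  omega

theorem pvBucket_spec (M : Int) (l : List Int) (acc : List (Int × Int) × List (Int × Int)) :
    l.foldl (fun (eo : List (Int × Int) × List (Int × Int)) s =>
      if pvPar M s = 0 then (eo.1 ++ [pvSite M s], eo.2) else (eo.1, eo.2 ++ [pvSite M s])) acc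
    = (acc.1 ++ ((l.filter (fun s => decide (pvPar M s = 0))).map (pvSite M)),
       acc.2 ++ ((l.filter (fun s => !decide (pvPar M s = 0))).map (pvSite M))) := by
  induction l generalizing acc with
  | nil => simp
  | cons a t ih =>
    simp only [List.foldl_cons, List.filter_cons]
    by_cases h : pvPar M a = 0 <;> simp [h, ih]

-- ===== VERDICT (by name: the statement is the Claim_ definition above) =====
theorem get_idx_vector_spec : Claim_equal_get_idx_vector := by
  intro L N M _
  unfold Spec_get_idx_vector get_idx_vector get_idx_vector_alt
  by_cases hL : L ≤ 0
  · rw [if_pos hL, PySem.List.pyRange_one_eq_nil hL]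
    rfl
  rw [if_neg hL]
  have hb : (fun (eo : List (Int × Int) × List (Int × Int)) (s : Int) =>
      let x := PySem.Int.mod s M
      let y := PySem.Int.floordiv s M
      if PySem.Int.mod (PySem.Int.mod x 2 + PySem.Int.mod y 2) 2 = 0 then
        (eo.1 ++ [(x, y)], eo.2)
      else
        (eo.1, eo.2 ++ [(x, y)]))
      = (fun eo s =>
        if pvPar M s = 0 then (eo.1 ++ [pvSite M s], eo.2) else (eo.1, eo.2 ++ [pvSite M s])) := rfl
  rw [hb, pvBucket_spec]
  simp only [List.nil_append]
  apply PySem.List.foldl_congr_mem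
  intro acc f _
  have ha : (fun (idx_vector : List ((Int × Int) × Int)) (s : Int) =>
      let x_idx := PySem.Int.mod s M
      let y_idx := PySem.Int.floordiv s M
      let lattice_parity := PySem.Int.mod (PySem.Int.mod x_idx 2 + PySem.Int.mod y_idx 2) 2
      if lattice_parity ≠ PySem.Int.mod f 2 then idx_vector
      else idx_vector ++ [((x_idx, y_idx), f)])
      = (fun idx_vector s =>
        if pvPar M s = PySem.Int.mod f 2 then idx_vector ++ [(pvSite M s, f)] else idx_vector) := by
    funext acc s
    simp only [pvPar, pvSite, ne_eq]
    by_cases h : PySem.Int.mod (PySem.Int.mod (PySem.Int.mod s M) 2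
        + PySem.Int.mod (PySem.Int.floordiv s M) 2) 2 = PySem.Int.mod f 2
    · rw [if_neg (not_not_intro h), if_pos h]
    · rw [if_pos h, if_neg h]
  rw [ha, PySem.List.foldl_append_ite, PySem.List.foldl_append_singleton_eq_map]
  rcases pvMod2_cases f with h | h <;> rw [h]
  · rw [if_pos rfl, List.map_map]
    rfl
  · have hfil : List.filter (fun x => decide (pvPar M x = 1)) (PySem.List.pyRange 0 (N * M) 1)
        = List.filter (fun s => !decide (pvPar M s = 0)) (PySem.List.pyRange 0 (N * M) 1) :=
      List.filter_congr (by
        intro x _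
        rcases pvPar_cases M x with hc | hc <;> simp [hc])
    rw [if_neg (by norm_num), List.map_map, ← hfil]
    rfl
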